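-- pv_equiv track=rewrite | github.com/Arpicle/water_distribution_opt_v2 | simulation.py | make_x_array
-- ===== SOURCE A (Python) =====
-- import bisect
--
-- def make_x_array(x, sub_channel):
--     res_x = list(x)
--     res_y = [[0,0,0,0] for _ in range(len(res_x))]
--     sub_channel_sorted = sorted(sub_channel, key=lambda item: item[0])
--     for point_x, point_y in sub_channel_sorted:
--         count = res_x.count(point_x)
--         if count == 0:
--             idx = bisect.bisect_left(res_x, point_x)
--             res_x.insert(idx, point_x)
--             res_y.insert(idx, list(point_y))
--             res_x.insert(idx + 1, point_x)
--             res_y.insert(idx + 1, [0,0,0,0])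
--         elif count == 1:
--             idx = bisect.bisect_left(res_x, point_x)
--             res_x.insert(idx, point_x)
--             res_y.insert(idx, list(point_y))
--     return res_x, res_y
-- ===== SOURCE B (Python) =====
-- def make_x_array(x, sub_channel):
--     # Requires x sorted ascending (A's bisect assumes it too).
--     # Single merge pass: no insertions into the middle, no bisect, no count scans.
--     cnt = {}
--     for v in x:
--         cnt[v] = cnt.get(v, 0) + 1
--     res_x, res_y = [], []
--     i, n = 0, len(x)
--     prev = None
--     first = True
--     for v, y in sorted(sub_channel, key=lambda item: item[0]):
--         if not first and v == prev:
--             continue  # duplicates are adjacent after sorting; only the first acts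
--         first = False
--         prev = v
--         while i < n and x[i] < v:
--             res_x.append(x[i])
--             res_y.append([0, 0, 0, 0])
--             i += 1
--         c = cnt.get(v, 0)
--         if c == 0:
--             res_x += [v, v]
--             res_y += [list(y), [0, 0, 0, 0]]
--         elif c == 1:
--             res_x.append(v)
--             res_y.append(list(y))
--     while i < n:
--         res_x.append(x[i])
--         res_y.append([0, 0, 0, 0])
--         i += 1
--     return res_x, res_y
-- ===== Notes on version B (the rewrite author's own statement) =====
-- stated objective: faster
-- what changed: B builds the result in one left-to-right merge pass over x and the sorted sub-channel points (a count dict of x decides the 0/1/many cases, adjacent duplicates after sorting are skipped), appending only to the output; A's per-point count scan of the growing list, bisect and middle-of-list insertions disappear.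
import Mathlib
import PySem

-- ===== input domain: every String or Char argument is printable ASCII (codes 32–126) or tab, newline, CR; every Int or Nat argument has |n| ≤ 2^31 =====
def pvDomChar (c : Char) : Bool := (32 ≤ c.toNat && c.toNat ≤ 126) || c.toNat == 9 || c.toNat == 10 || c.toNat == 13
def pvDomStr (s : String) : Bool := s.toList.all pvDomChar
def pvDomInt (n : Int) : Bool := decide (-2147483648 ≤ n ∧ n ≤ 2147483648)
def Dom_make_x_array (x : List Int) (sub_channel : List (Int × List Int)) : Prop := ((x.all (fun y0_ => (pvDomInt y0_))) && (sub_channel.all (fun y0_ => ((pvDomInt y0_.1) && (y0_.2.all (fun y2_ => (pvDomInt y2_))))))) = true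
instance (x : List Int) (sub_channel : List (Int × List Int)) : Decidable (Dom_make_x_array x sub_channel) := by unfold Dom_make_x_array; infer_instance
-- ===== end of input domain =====

-- B replaces A's per-point count scan + bisect + middle insertions by a single left-to-right
-- merge pass over sorted x and the sorted sub-channel points (objective: faster).

-- ===== PORT A =====
def pvZeroRow : List Int := [0, 0, 0, 0]

-- body of A's for-loop (state = (res_x, res_y))
def pvStepA (st : List Int × List (List Int)) (point : Int × List Int) : List Int × List (List Int) :=
  let count := PySem.List.count st.1 point.1
  if count = 0 then
    let idx := PySem.List.bisectLeft st.1 point.1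
    let rx := PySem.List.insert st.1 (idx : Int) point.1
    let ry := PySem.List.insert st.2 (idx : Int) point.2
    (PySem.List.insert rx ((idx : Int) + 1) point.1,
     PySem.List.insert ry ((idx : Int) + 1) pvZeroRow)
  else if count = 1 then
    let idx := PySem.List.bisectLeft st.1 point.1
    (PySem.List.insert st.1 (idx : Int) point.1,
     PySem.List.insert st.2 (idx : Int) point.2)
  else st

def make_x_array (x : List Int) (sub_channel : List (Int × List Int)) : List Int × List (List Int) :=
  let res_x := x
  let res_y := (List.range res_x.length).map (fun _ => pvZeroRow)
  let sub_channel_sorted := PySem.List.sorted sub_channel (fun item => item.1)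
  sub_channel_sorted.foldl pvStepA (res_x, res_y)

-- ===== PORT B =====
-- body of B's for-loop; state = (rest of x not yet emitted, res_x, res_y, prev).
-- The python 'while i < n and x[i] < v' emission is exactly takeWhile/dropWhile on the rest.
def pvStepB (cnt : PySem.Dict Int Int) (st : List Int × List Int × List (List Int) × Option Int)
    (p : Int × List Int) : List Int × List Int × List (List Int) × Option Int :=
  if st.2.2.2 = some p.1 then st
  else
    let t := st.1.takeWhile (fun e => decide (e < p.1))
    let r := st.1.dropWhile (fun e => decide (e < p.1))
    let rx := st.2.1 ++ t
    let ry := st.2.2.1 ++ t.map (fun _ => pvZeroRow)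
    let c := cnt.getD p.1 0
    if c = 0 then (r, rx ++ [p.1, p.1], ry ++ [p.2, pvZeroRow], some p.1)
    else if c = 1 then (r, rx ++ [p.1], ry ++ [p.2], some p.1)
    else (r, rx, ry, some p.1)

def make_x_array_alt (x : List Int) (sub_channel : List (Int × List Int)) : List Int × List (List Int) :=
  let cnt := x.foldl (fun d v => d.insert v (d.getD v 0 + 1)) PySem.Dict.empty
  let st := (PySem.List.sorted sub_channel (fun item => item.1)).foldl (pvStepB cnt) (x, [], [], none)
  (st.2.1 ++ st.1, st.2.2.1 ++ st.1.map (fun _ => pvZeroRow))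

-- ===== PRECONDITION & SPEC =====
-- Pre_ excludes inputs where some acting point (value occurring ≤ 1 time in x) meets an x that
-- is not partitioned w.r.t. that value (some element ≥ v precedes one < v) — there A's bisect_left
-- placement on the unsorted list is accidental; sorted x (the natural domain) always satisfies Pre_.
def Pre_make_x_array (x : List Int) (sub_channel : List (Int × List Int)) : Prop :=
  ∀ p ∈ sub_channel, 2 ≤ List.count p.1 x ∨
    List.Pairwise (fun a b => b < p.1 → a < p.1) x
instance (x : List Int) (sub_channel : List (Int × List Int)) : Decidable (Pre_make_x_array x sub_channel) := by unfold Pre_make_x_array; infer_instance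

def pvWitness_make_x_array : List Int × (List (Int × List Int)) :=
  ([1, 2, 2], [(0, [1, 2, 3, 4]), (2, [5, 6, 7, 8])])

def Spec_make_x_array (x : List Int) (sub_channel : List (Int × List Int)) (out : List Int × List (List Int)) : Prop := out = make_x_array_alt x sub_channel
instance (x : List Int) (sub_channel : List (Int × List Int)) (out : List Int × List (List Int)) : Decidable (Spec_make_x_array x sub_channel out) := by unfold Spec_make_x_array; infer_instance

-- ===== CLAIM (what is proved, stated in full; the proofs are below) =====
def Claim_equal_make_x_array : Prop := ∀ (x : List Int) (sub_channel : List (Int × List Int)), Dom_make_x_array x sub_channel → Pre_make_x_array x sub_channel → Spec_make_x_array x sub_channel (make_x_array x sub_channel)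

-- ===== LEMMAS AND PROOFS =====

-- A's state is exactly the output B would produce if it stopped now
def pvOut (st : List Int × List Int × List (List Int) × Option Int) : List Int × List (List Int) :=
  (st.2.1 ++ st.1, st.2.2.1 ++ st.1.map (fun _ => pvZeroRow))

-- invariant tying B's state to the original x and the remaining sorted points ss
def pvInv (x : List Int) (ss : List (Int × List Int))
    (st : List Int × List Int × List (List Int) × Option Int) : Prop :=
  (∀ q ∈ ss, List.count q.1 x ≤ 1 →
    List.Pairwise (fun a b => b < q.1 → a < q.1) (st.2.1 ++ st.1)) ∧
  st.2.2.1.length = st.2.1.length ∧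
  (∀ p ∈ ss, List.count p.1 st.1 = List.count p.1 x) ∧
  (∀ p ∈ ss, st.2.2.2 ≠ some p.1 → List.count p.1 st.2.1 = 0) ∧
  (∀ q, st.2.2.2 = some q → 2 ≤ List.count q (st.2.1 ++ st.1) ∧ ∀ p ∈ ss, q ≤ p.1) ∧
  (∀ p ∈ ss, ∀ d ∈ st.2.1, d ≤ p.1)

-- bisect_left is exact on any list partitioned w.r.t. v (all elements < v first)
lemma pv_bisect_loop (L r : List Int) (v : Int)
    (hL : ∀ e ∈ L, e < v) (hr : ∀ e ∈ r, v ≤ e) :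
    ∀ (fuel lo hi : Nat), lo ≤ L.length → L.length ≤ hi → hi ≤ (L ++ r).length →
      hi - lo ≤ fuel → PySem.List.bisectLeftLoop (L ++ r) v fuel lo hi = L.length := by
  intro fuel
  induction fuel with
  | zero =>
      intro lo hi h1 h2 h3 h4
      simp only [PySem.List.bisectLeftLoop]
      omega
  | succ fuel ih =>
      intro lo hi h1 h2 h3 h4
      by_cases hlt : lo < hi
      · have hmid : (lo + hi) / 2 < (L ++ r).length := by omega
        simp only [PySem.List.bisectLeftLoop, if_pos hlt, List.getElem?_eq_getElem hmid]
        by_cases hside : (lo + hi) / 2 < L.length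
        · have hy : (L ++ r)[(lo + hi) / 2] = L[(lo + hi) / 2]'hside :=
            List.getElem_append_left hside
          rw [if_pos (by rw [hy]; exact hL _ (List.getElem_mem hside))]
          exact ih ((lo + hi) / 2 + 1) hi (by omega) h2 h3 (by omega)
        · have hy : (L ++ r)[(lo + hi) / 2]
              = r[(lo + hi) / 2 - L.length]'(by simp at hmid ⊢; omega) :=
            List.getElem_append_right (by omega)
          rw [if_neg (by rw [hy]; exact not_lt.mpr (hr _ (List.getElem_mem _)))]
          exact ih lo ((lo + hi) / 2) (by omega) (by omega) (by omega) (by omega)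
      · simp only [PySem.List.bisectLeftLoop, if_neg hlt]
        omega

lemma pv_bisect_eq (L r : List Int) (v : Int)
    (hL : ∀ e ∈ L, e < v) (hr : ∀ e ∈ r, v ≤ e) :
    PySem.List.bisectLeft (L ++ r) v = L.length := by
  exact pv_bisect_loop L r v hL hr (L ++ r).length 0 (L ++ r).length
    (Nat.zero_le _) (by simp) le_rfl (by omega)

lemma pv_dropWhile_ge (rest : List Int) (v : Int)
    (hs : List.Pairwise (fun a b => b < v → a < v) rest) :
    ∀ e ∈ rest.dropWhile (fun e => decide (e < v)), v ≤ e := by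
  induction rest with
  | nil => simp
  | cons a l ih =>
      rw [List.pairwise_cons] at hs
      by_cases ha : a < v
      · rw [List.dropWhile_cons_of_pos (by simpa using ha)]
        exact ih hs.2
      · rw [List.dropWhile_cons_of_neg (by simpa using ha)]
        intro e he
        rcases List.mem_cons.mp he with rfl | he
        · omega
        · by_contra hlt
          exact ha (hs.1 e he (by omega))

-- insert at exactly the junction of an append
lemma pv_insert_at_len {α : Type} (L r : List α) (a : α) :
    PySem.List.insert (L ++ r) ((L.length : Nat) : Int) a = L ++ a :: r := by
  rw [PySem.List.insert_natCast _ _ _ (by simp)]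
  rw [List.take_left, List.drop_left]

lemma pv_insert2_at_len {α : Type} (L r : List α) (a b : α) :
    PySem.List.insert (PySem.List.insert (L ++ r) ((L.length : Nat) : Int) a)
      (((L.length : Nat) : Int) + 1) b = L ++ a :: b :: r := by
  rw [pv_insert_at_len]
  have h1 : L ++ a :: b :: r = (L ++ [a]) ++ b :: r := by simp
  have h2 : ((L.length : Nat) : Int) + 1 = (((L ++ [a]).length : Nat) : Int) := by
    simp
  rw [h2, show L ++ a :: r = (L ++ [a]) ++ r by simp, pv_insert_at_len, h1]

lemma pv_part_splice (L r vs : List Int) (v w : Int) (hvw : v ≤ w)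
    (hs : List.Pairwise (fun a b => b < w → a < w) (L ++ r))
    (hL : ∀ e ∈ L, e < v) (hr : ∀ e ∈ r, v ≤ e) (hvs : ∀ e ∈ vs, e = v) :
    List.Pairwise (fun a b => b < w → a < w) (L ++ vs ++ r) := by
  rw [List.pairwise_append] at hs
  rw [List.append_assoc, List.pairwise_append, List.pairwise_append]
  refine ⟨hs.1, ⟨?_, hs.2.1, ?_⟩, ?_⟩
  · refine List.pairwise_iff_forall_sublist.mpr ?_
    intro a b h
    have ha := hvs a (h.subset (by simp))
    have hb := hvs b (h.subset (by simp))
    omega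
  · intro a ha b hb hbw
    have := hvs a ha
    have := hr b hb
    omega
  · intro a ha b hb
    rcases List.mem_append.mp hb with hb | hb
    · intro _
      have := hL a ha
      have := hvs b hb
      omega
    · exact hs.2.2 a ha b hb

-- re-establishing the invariant after a first-occurrence step; vs is what got spliced in
lemma pv_inv_next (x : List Int) (p : Int × List Int) (ss : List (Int × List Int))
    (rest bx : List Int) (by_ : List (List Int)) (prev : Option Int) (vs : List Int)
    (ys : List (List Int))
    (hpartnew : ∀ q ∈ ss, List.count q.1 x ≤ 1 →
      List.Pairwise (fun a b => b < q.1 → a < q.1)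
        ((bx ++ rest.takeWhile (fun e => decide (e < p.1)) ++ vs)
          ++ rest.dropWhile (fun e => decide (e < p.1))))
    (hlen : by_.length = bx.length)
    (h5 : ∀ q ∈ p :: ss, List.count q.1 rest = List.count q.1 x)
    (h6 : ∀ q ∈ p :: ss, prev ≠ some q.1 → List.count q.1 bx = 0)
    (h7 : ∀ q', prev = some q' → 2 ≤ List.count q' (bx ++ rest) ∧ ∀ q ∈ p :: ss, q' ≤ q.1)
    (h8 : ∀ q ∈ p :: ss, ∀ d ∈ bx, d ≤ q.1)
    (hp : ∀ q ∈ ss, p.1 ≤ q.1) (hdup : prev ≠ some p.1)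
    (hvs : ∀ e ∈ vs, e = p.1) (hys : ys.length = vs.length)
    (h2 : 2 ≤ List.count p.1 vs + List.count p.1 (rest.dropWhile (fun e => decide (e < p.1)))) :
    pvInv x ss (rest.dropWhile (fun e => decide (e < p.1)),
      bx ++ rest.takeWhile (fun e => decide (e < p.1)) ++ vs,
      by_ ++ (rest.takeWhile (fun e => decide (e < p.1))).map (fun _ => pvZeroRow) ++ ys,
      some p.1) := by
  set t := rest.takeWhile (fun e => decide (e < p.1)) with htdef
  set r := rest.dropWhile (fun e => decide (e < p.1)) with hrdef
  have hsplit : t ++ r = rest := List.takeWhile_append_dropWhile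
  have hbx0 : List.count p.1 bx = 0 := h6 p (List.mem_cons_self) hdup
  have hbxlt : ∀ d ∈ bx, d < p.1 := by
    intro d hd
    have h1 := h8 p (List.mem_cons_self) d hd
    have h2 : d ≠ p.1 := fun h => (List.count_eq_zero.mp hbx0) (h ▸ hd)
    omega
  have htlt : ∀ e ∈ t, e < p.1 := fun e he => by simpa using List.mem_takeWhile_imp he
  have hct0 : ∀ w, p.1 ≤ w → List.count w t = 0 := by
    intro w hw
    exact List.count_eq_zero.mpr (fun h => by have := htlt w h; omega)
  have hcr : ∀ q ∈ p :: ss, List.count q.1 r = List.count q.1 x := by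
    intro q hq
    have := h5 q hq
    rw [← hsplit, List.count_append] at this
    have hq1 : p.1 ≤ q.1 := by
      rcases List.mem_cons.mp hq with rfl | hq'
      · exact le_rfl
      · exact hp q hq'
    rw [hct0 q.1 hq1] at this
    omega
  refine ⟨?_, ?_, ?_, ?_, ?_, ?_⟩
  · -- the partition property w.r.t. every pending acting value is maintained
    intro q hq hq1
    simpa [List.append_assoc] using hpartnew q hq hq1
  · simp [hlen, hys]
  · -- counts of the rest
    intro q hq
    exact hcr q (List.mem_cons_of_mem p hq)
  · -- nothing of a still-pending first occurrence sits in the emitted part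
    intro q hq hne
    have hne' : p.1 ≠ q.1 := fun h => hne (by simp [h])
    have hqin : q ∈ p :: ss := List.mem_cons_of_mem p hq
    have hprev : prev ≠ some q.1 := by
      intro h
      have := (h7 q.1 h).2 p (List.mem_cons_self)
      have := hp q hq
      omega
    have hbxq := h6 q hqin hprev
    have htq : List.count q.1 t = 0 := hct0 q.1 (hp q hq)
    have hvsq : List.count q.1 vs = 0 :=
      List.count_eq_zero.mpr (fun h => hne' (hvs q.1 h).symm)
    simp [List.count_append, hbxq, htq, hvsq]
  · -- the just-processed value now occurs at least twice
    intro q' hq'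
    obtain rfl : q' = p.1 := by injection hq' with h; exact h.symm
    refine ⟨?_, fun q hq => hp q hq⟩
    have hbt : List.count p.1 t = 0 := hct0 p.1 le_rfl
    simp only [List.count_append, hbx0, hbt]
    omega
  · -- emitted values stay below pending first occurrences
    intro q hq d hd
    have hq1 : p.1 ≤ q.1 := hp q hq
    rcases List.mem_append.mp hd with hd | hd
    · rcases List.mem_append.mp hd with hd | hd
      · exact h8 q (List.mem_cons_of_mem p hq) d hd
      · have := htlt d hd; omega
    · have := hvs d hd; omega

lemma pv_step (x : List Int) (cnt : PySem.Dict Int Int)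
    (hcnt : ∀ v, cnt.getD v 0 = (List.count v x : Int))
    (p : Int × List Int) (ss : List (Int × List Int))
    (hp : ∀ q ∈ ss, p.1 ≤ q.1)
    (st : List Int × List Int × List (List Int) × Option Int)
    (hinv : pvInv x (p :: ss) st) :
    pvStepA (pvOut st) p = pvOut (pvStepB cnt st p) ∧ pvInv x ss (pvStepB cnt st p) := by
  obtain ⟨rest, bx, by_, prev⟩ := st
  obtain ⟨hpart, hlen, h5, h6, h7, h8⟩ := hinv
  simp only at hpart hlen h5 h6 h7 h8
  by_cases hdup : prev = some p.1
  · -- duplicate value: both sides do nothing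
    have h2c := (h7 p.1 hdup).1
    have hstB : pvStepB cnt (rest, bx, by_, prev) p = (rest, bx, by_, prev) := by
      simp only [pvStepB, if_pos hdup]
    refine ⟨?_, ?_⟩
    · rw [hstB]
      simp only [pvStepA, pvOut, PySem.List.count_eq]
      rw [if_neg (by omega), if_neg (by omega)]
    · rw [hstB]
      refine ⟨fun q hq => hpart q (List.mem_cons_of_mem p hq), hlen, ?_, ?_, ?_, ?_⟩
      · exact fun q hq => h5 q (List.mem_cons_of_mem p hq)
      · exact fun q hq => h6 q (List.mem_cons_of_mem p hq)
      · exact fun q' hq' => ⟨(h7 q' hq').1, fun q hq => (h7 q' hq').2 q (List.mem_cons_of_mem p hq)⟩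
      · exact fun q hq => h8 q (List.mem_cons_of_mem p hq)
  · -- first occurrence of this value
    set t := rest.takeWhile (fun e => decide (e < p.1)) with htdef
    set r := rest.dropWhile (fun e => decide (e < p.1)) with hrdef
    have hsplit : t ++ r = rest := List.takeWhile_append_dropWhile
    have hbx0 : List.count p.1 bx = 0 := h6 p (List.mem_cons_self) hdup
    have hbxlt : ∀ d ∈ bx, d < p.1 := by
      intro d hd
      have h1 := h8 p (List.mem_cons_self) d hd
      have h2 : d ≠ p.1 := fun h => (List.count_eq_zero.mp hbx0) (h ▸ hd)
      omega
    have htlt : ∀ e ∈ t, e < p.1 := fun e he => by simpa using List.mem_takeWhile_imp he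
    have hLlt : ∀ e ∈ bx ++ t, e < p.1 := by
      intro e he
      rcases List.mem_append.mp he with h | h
      · exact hbxlt e h
      · exact htlt e h
    have hrw : bx ++ rest = (bx ++ t) ++ r := by rw [List.append_assoc, hsplit]
    -- only when the point acts (count ≤ 1) do we know x is partitioned w.r.t. its value
    have hrge : List.count p.1 x ≤ 1 → ∀ e ∈ r, p.1 ≤ e := fun hle =>
      pv_dropWhile_ge rest p.1
        ((List.pairwise_append.mp (hpart p (List.mem_cons_self) hle)).2.1)
    have hbis : List.count p.1 x ≤ 1 →
        PySem.List.bisectLeft (bx ++ rest) p.1 = (bx ++ t).length := fun hle => by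
      rw [hrw]; exact pv_bisect_eq (bx ++ t) r p.1 hLlt (hrge hle)
    have hct0 : List.count p.1 t = 0 :=
      List.count_eq_zero.mpr (fun h => by have := htlt p.1 h; omega)
    have hcr : List.count p.1 r = List.count p.1 x := by
      have := h5 p (List.mem_cons_self)
      rw [← hsplit, List.count_append, hct0] at this
      omega
    have hcA : List.count p.1 (bx ++ rest) = List.count p.1 x := by
      rw [List.count_append, hbx0, h5 p (List.mem_cons_self)]
      omega
    have hyrw : by_ ++ rest.map (fun _ => pvZeroRow)
        = (by_ ++ t.map (fun _ => pvZeroRow)) ++ r.map (fun _ => pvZeroRow) := by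
      rw [List.append_assoc, ← List.map_append, hsplit]
    have hylen : (bx ++ t).length = (by_ ++ t.map (fun _ => pvZeroRow)).length := by
      simp [hlen]
    have hcB : cnt.getD p.1 0 = (List.count p.1 x : Int) := hcnt p.1
    -- three cases on the original multiplicity of p.1 in x
    rcases Nat.lt_or_ge (List.count p.1 x) 2 with hsm | hbig
    · rcases Nat.lt_or_ge (List.count p.1 x) 1 with hc0 | hc1
      · -- count 0: both insert the point row and a zero row
        have hn : List.count p.1 x = 0 := by omega
        have hstB : pvStepB cnt (rest, bx, by_, prev) p
            = (r, bx ++ t ++ [p.1, p.1],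
               by_ ++ t.map (fun _ => pvZeroRow) ++ [p.2, pvZeroRow], some p.1) := by
          simp only [pvStepB, if_neg hdup, hcB, hn]
          norm_num
          exact ⟨rfl, rfl, rfl⟩
        refine ⟨?_, ?_⟩
        · rw [hstB]
          simp only [pvStepA, pvOut, PySem.List.count_eq]
          rw [if_pos (by omega : List.count p.1 (bx ++ rest) = 0), hbis (by omega)]
          rw [hrw, pv_insert2_at_len]
          rw [hyrw, hylen, pv_insert2_at_len]
          simp
        · rw [hstB]
          refine pv_inv_next x p ss rest bx by_ prev [p.1, p.1] [p.2, pvZeroRow]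
            (by
              intro q hq hq1
              have hold := hpart q (List.mem_cons_of_mem p hq) hq1
              rw [← hsplit, ← List.append_assoc] at hold
              simpa [List.append_assoc] using
                pv_part_splice (bx ++ t) r [p.1, p.1] p.1 q.1 (hp q hq) hold hLlt
                  (hrge (by omega)) (by intro e he; simpa using he))
            hlen h5 h6 h7 h8 hp hdup (by intro e he; simpa using he) rfl ?_
          simp
      · -- count 1: both insert the point row before the existing copy
        have hn : List.count p.1 x = 1 := by omega
        have hstB : pvStepB cnt (rest, bx, by_, prev) p
            = (r, bx ++ t ++ [p.1],
               by_ ++ t.map (fun _ => pvZeroRow) ++ [p.2], some p.1) := by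
          simp only [pvStepB, if_neg hdup, hcB, hn]
          norm_num
          exact ⟨rfl, rfl, rfl⟩
        refine ⟨?_, ?_⟩
        · rw [hstB]
          simp only [pvStepA, pvOut, PySem.List.count_eq]
          rw [if_neg (by omega), if_pos (by omega : List.count p.1 (bx ++ rest) = 1), hbis (by omega)]
          rw [hrw, pv_insert_at_len]
          rw [hyrw, hylen, pv_insert_at_len]
          simp
        · rw [hstB]
          refine pv_inv_next x p ss rest bx by_ prev [p.1] [p.2]
            (by
              intro q hq hq1
              have hold := hpart q (List.mem_cons_of_mem p hq) hq1
              rw [← hsplit, ← List.append_assoc] at hold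
              simpa [List.append_assoc] using
                pv_part_splice (bx ++ t) r [p.1] p.1 q.1 (hp q hq) hold hLlt
                  (hrge (by omega)) (by intro e he; simpa using he))
            hlen h5 h6 h7 h8 hp hdup (by intro e he; simpa using he) rfl ?_
          have h1 : List.count p.1 (rest.dropWhile (fun e => decide (e < p.1))) = 1 := by
            rw [← hrdef, hcr, hn]
          simp [h1]
    · -- count ≥ 2: A skips; B only advances past the smaller x elements
      have hstB : pvStepB cnt (rest, bx, by_, prev) p
          = (r, bx ++ t, by_ ++ t.map (fun _ => pvZeroRow), some p.1) := by
        simp only [pvStepB, if_neg hdup, hcB]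
        rw [if_neg (by omega), if_neg (by omega)]
      refine ⟨?_, ?_⟩
      · rw [hstB]
        simp only [pvStepA, pvOut, PySem.List.count_eq]
        rw [if_neg (by omega), if_neg (by omega)]
        simp only [hrw, hyrw]
      · rw [hstB]
        have := pv_inv_next x p ss rest bx by_ prev [] []
          (by
            intro q hq hq1
            rw [List.append_nil, List.append_assoc, hsplit]
            exact hpart q (List.mem_cons_of_mem p hq) hq1)
          hlen h5 h6 h7 h8 hp hdup (by simp) rfl
          (by simp only [List.count_nil, ← hrdef, hcr]; omega)
        simpa using this

lemma pv_fold (x : List Int) (cnt : PySem.Dict Int Int)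
    (hcnt : ∀ v, cnt.getD v 0 = (List.count v x : Int)) :
    ∀ (ss : List (Int × List Int)), ss.Pairwise (fun a b => a.1 ≤ b.1) →
    ∀ st, pvInv x ss st →
    ss.foldl pvStepA (pvOut st) = pvOut (ss.foldl (pvStepB cnt) st) := by
  intro ss
  induction ss with
  | nil => intro _ st _; rfl
  | cons p t ih =>
      intro hpw st hinv
      rw [List.pairwise_cons] at hpw
      obtain ⟨hagree, hinv'⟩ := pv_step x cnt hcnt p t (fun q hq => hpw.1 q hq) st hinv
      rw [List.foldl_cons, List.foldl_cons, hagree]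
      exact ih hpw.2 _ hinv'

-- ===== VERDICT (by name: the statement is the Claim_ definition above) =====
theorem make_x_array_spec : Claim_equal_make_x_array := by
  intro x sub _ hpre
  unfold Spec_make_x_array
  simp only [make_x_array, make_x_array_alt]
  rw [PySem.Dict.foldl_insert_getD_add_one_eq_counter]
  rw [show (List.range x.length).map (fun _ => pvZeroRow) = x.map (fun _ => pvZeroRow) by simp]
  have hinit : pvInv x (PySem.List.sorted sub (fun item => item.1)) (x, [], [], none) := by
    refine ⟨?_, rfl, fun p _ => rfl, by simp, by simp, by simp⟩
    intro q hq hq1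
    rcases hpre q ((PySem.List.mem_sorted sub (fun item => item.1) false q).mp hq) with h | h
    · omega
    · simpa using h
  have := pv_fold x (PySem.Dict.counter x) (fun v => PySem.Dict.getD_counter x v)
    (PySem.List.sorted sub (fun item => item.1))
    (PySem.List.sorted_pairwise sub (fun item => item.1)) (x, [], [], none) hinit
  simp only [pvOut, List.nil_append] at this
  exact this
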